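-- pv_equiv track=rewrite | github.com/appknox/Playstore-Crawler-POC | src/sitemap_processor.py | group_by_region
-- ===== SOURCE A (Python) =====
-- def group_by_region(data):
--     # Implement grouping logic
--     grouped_data = {}
--     for item in data:
--         for hreflang, href in item[2]:
--             if hreflang not in grouped_data:
--                 grouped_data[hreflang] = []
--             grouped_data[hreflang].append({
--                 'url': item[0],
--                 'app_id': item[1],
--                 'alternate_link': href
--             })
--     return grouped_data
-- ===== SOURCE B (Python) =====
-- def group_by_region(data):
--     # Flatten once into (hreflang, record) pairs, then build each group
--     # by a per-key scan over the flat list (keys in first-appearance order).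
--     pairs = [(h, {'url': u, 'app_id': a, 'alternate_link': href})
--              for u, a, links in data for h, href in links]
--     keys = list(dict.fromkeys(h for h, _ in pairs))
--     return {k: [r for h, r in pairs if h == k] for k in keys}
-- ===== Notes on version B (the rewrite author's own statement) =====
-- stated objective: alternative
-- what changed: B replaces A's single pass that mutates a dict of growing lists by a flatten-then-group decomposition: flatten data into (hreflang, record) pairs, take the first-occurrence key order, and build each group by an independent scan (comprehension) over the flat pair list.
import Mathlib
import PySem

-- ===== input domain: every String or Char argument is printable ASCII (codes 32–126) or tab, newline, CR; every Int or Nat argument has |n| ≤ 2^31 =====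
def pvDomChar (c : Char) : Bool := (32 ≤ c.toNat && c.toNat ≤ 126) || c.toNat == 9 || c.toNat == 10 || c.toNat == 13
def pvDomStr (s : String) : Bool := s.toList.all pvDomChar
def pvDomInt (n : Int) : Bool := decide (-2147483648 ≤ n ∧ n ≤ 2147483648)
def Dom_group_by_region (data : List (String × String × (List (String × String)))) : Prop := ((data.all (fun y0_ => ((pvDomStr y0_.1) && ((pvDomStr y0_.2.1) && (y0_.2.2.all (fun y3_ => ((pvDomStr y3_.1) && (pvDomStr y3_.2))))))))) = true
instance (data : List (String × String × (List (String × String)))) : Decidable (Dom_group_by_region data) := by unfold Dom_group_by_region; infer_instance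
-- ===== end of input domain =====

-- B replaces the dict-mutating single pass by flatten + first-occurrence keys + per-key scans; alternative decomposition, return value proved equal.


-- ===== PORT A =====
def group_by_region (data : List (String × String × (List (String × String)))) : List (String × List (List (String × String))) :=
  (data.foldl (fun grouped item =>
      item.2.2.foldl (fun grouped p =>
        let grouped := if grouped.contains p.1 then grouped else grouped.insert p.1 []
        grouped.modify p.1 [] (fun l => l ++ [[("url", item.1), ("app_id", item.2.1), ("alternate_link", p.2)]]))
        grouped)
    PySem.Dict.empty).items

-- ===== PORT B =====
def pairsOf (data : List (String × String × (List (String × String)))) : List (String × List (String × String)) :=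
  data.flatMap (fun item => item.2.2.map (fun p =>
    (p.1, [("url", item.1), ("app_id", item.2.1), ("alternate_link", p.2)])))

def group_by_region_alt (data : List (String × String × (List (String × String)))) : List (String × List (List (String × String))) :=
  let pairs := pairsOf data
  let keys := PySem.List.dedup (pairs.map (·.1))
  keys.map (fun k => (k, (pairs.filter (fun q => q.1 == k)).map (·.2)))

-- ===== PRECONDITION & SPEC =====
def Spec_group_by_region (data : List (String × String × (List (String × String)))) (out : List (String × List (List (String × String)))) : Prop := out = group_by_region_alt data
instance (data : List (String × String × (List (String × String)))) (out : List (String × List (List (String × String)))) : Decidable (Spec_group_by_region data out) := by unfold Spec_group_by_region; infer_instance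

-- ===== CLAIM (what is proved, stated in full; the proofs are below) =====
def Claim_equal_group_by_region : Prop := ∀ (data : List (String × String × (List (String × String)))), Dom_group_by_region data → Spec_group_by_region data (group_by_region data)

-- ===== LEMMAS AND PROOFS =====
theorem step_eq_modify (d : PySem.Dict String (List (List (String × String)))) (k : String) (r : List (String × String)) :
    (let d' := if d.contains k then d else d.insert k []
     d'.modify k [] (fun l => l ++ [r])) = d.modify k [] (fun l => l ++ [r]) := by
  by_cases h : d.contains k
  · simp [h]
  · simp only [h, Bool.false_eq_true, if_false, PySem.Dict.modify,
      PySem.Dict.getD_insert_self, PySem.Dict.insert_insert_self]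
    rw [PySem.Dict.getD_of_not_contains (h := by simpa using h)]

theorem inner_fold (u a : String) (links : List (String × String)) (d : PySem.Dict String (List (List (String × String)))) :
    links.foldl (fun g p =>
        let g := if g.contains p.1 then g else g.insert p.1 []
        g.modify p.1 [] (fun l => l ++ [[("url", u), ("app_id", a), ("alternate_link", p.2)]])) d
    = links.foldl (fun g p => g.modify p.1 [] (fun l => l ++ [[("url", u), ("app_id", a), ("alternate_link", p.2)]])) d := by
  induction links generalizing d with
  | nil => rfl
  | cons p t ih =>
    rw [List.foldl_cons, List.foldl_cons, step_eq_modify]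
    exact ih _

theorem foldl_flatten (data : List (String × String × (List (String × String)))) (d : PySem.Dict String (List (List (String × String)))) :
    data.foldl (fun grouped item =>
      item.2.2.foldl (fun grouped p =>
        let grouped := if grouped.contains p.1 then grouped else grouped.insert p.1 []
        grouped.modify p.1 [] (fun l => l ++ [[("url", item.1), ("app_id", item.2.1), ("alternate_link", p.2)]]))
        grouped) d
    = (pairsOf data).foldl (fun grouped q => grouped.modify q.1 [] (fun l => l ++ [q.2])) d := by
  induction data generalizing d with
  | nil => rfl
  | cons item rest ih =>
    have hp : pairsOf (item :: rest)
        = item.2.2.map (fun p => (p.1, [("url", item.1), ("app_id", item.2.1), ("alternate_link", p.2)])) ++ pairsOf rest := rfl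
    rw [List.foldl_cons, hp, List.foldl_append, List.foldl_map, ih, inner_fold]

theorem dedup_is_update_nil (xs : List String) :
    PySem.List.dedup xs = PySem.Set.update ([] : PySem.Set String) xs := by
  simp [PySem.List.dedup, PySem.Set.ofList, PySem.Set.update]

-- ===== VERDICT (by name: the statement is the Claim_ definition above) =====
theorem group_by_region_spec : Claim_equal_group_by_region := by
  intro data _
  unfold Spec_group_by_region group_by_region group_by_region_alt
  dsimp only
  rw [foldl_flatten]
  have hnd : ((pairsOf data).foldl (fun grouped q => grouped.modify q.1 [] (fun l => l ++ [q.2])) PySem.Dict.empty).keys.Nodup :=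
    PySem.Dict.nodup_keys_foldl_modify_key (pairsOf data) (fun q => q.1)
      [] (fun _ q => (fun l => l ++ [q.2])) PySem.Dict.empty (by simp)
  rw [PySem.Dict.items_eq_map_keys _ hnd [],
      PySem.Dict.keys_foldl_modify_key (pairsOf data) (fun q => q.1) [] (fun _ q => (fun l => l ++ [q.2])) PySem.Dict.empty,
      show PySem.Dict.empty.keys = ([] : List String) from rfl, ← dedup_is_update_nil]
  refine List.map_congr_left ?_
  intro k _
  rw [PySem.Dict.getD_foldl_modify_append]
  simp
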